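-- pv_equiv track=rewrite | github.com/faccroot/pg_transformer_research | tools/analyze_sequence_shapes.py | shape_spine
-- ===== SOURCE A (Python) =====
-- END_TAGS = frozenset({"PERIOD", "QMARK", "EMARK"})
--
-- BREAK_TAGS = frozenset({"COMMA", "COLON", "SEMI"})
--
-- def compress_tags(tags: list[str], *, exact_counts: bool = True) -> list[str]:
--     if not tags:
--         return []
--     out: list[str] = []
--     current = tags[0]
--     count = 1
--     for tag in tags[1:]:
--         if tag == current:
--             count += 1
--             continue
--         if count > 1:
--             out.append(f"{current}x{count}" if exact_counts else f"{current}+")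
--         else:
--             out.append(current)
--         current = tag
--         count = 1
--     if count > 1:
--         out.append(f"{current}x{count}" if exact_counts else f"{current}+")
--     else:
--         out.append(current)
--     return out
--
-- def shape_spine(tags: list[str]) -> str:
--     spine = []
--     for tag in tags:
--         if tag.startswith("OP_"):
--             spine.append(tag)
--         elif tag in {"PRON", "DET", "PREP", "AUX"}:
--             spine.append(tag)
--         elif tag in BREAK_TAGS:
--             spine.append("BREAK")
--         elif tag in END_TAGS:
--             spine.append("END")
--     if not spine:
--         return "LEXICAL_ONLY"
--     return " ".join(compress_tags(spine, exact_counts=False))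
-- ===== SOURCE B (Python) =====
-- END_TAGS = frozenset({"PERIOD", "QMARK", "EMARK"})
-- BREAK_TAGS = frozenset({"COMMA", "COLON", "SEMI"})
-- KEEP_TAGS = frozenset({"PRON", "DET", "PREP", "AUX"})
--
-- def _spine_symbol(tag):
--     if tag.startswith("OP_"):
--         return tag
--     if tag in KEEP_TAGS:
--         return tag
--     if tag in BREAK_TAGS:
--         return "BREAK"
--     if tag in END_TAGS:
--         return "END"
--     return None
--
-- def shape_spine(tags: list[str]) -> str:
--     # single pass: classify and run-length-compress at once, no intermediate spine list
--     parts = []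
--     current = None
--     count = 0
--     for tag in tags:
--         sym = _spine_symbol(tag)
--         if sym is None:
--             continue
--         if sym == current:
--             count += 1
--         else:
--             if current is not None:
--                 parts.append(current + "+" if count > 1 else current)
--             current = sym
--             count = 1
--     if current is None:
--         return "LEXICAL_ONLY"
--     parts.append(current + "+" if count > 1 else current)
--     return " ".join(parts)
-- ===== Notes on version B (the rewrite author's own statement) =====
-- stated objective: simpler
-- what changed: B fuses classification and run-length compression into a single pass with a running (current, count) state, eliminating the intermediate spine list and the compress_tags helper.
import Mathlib
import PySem

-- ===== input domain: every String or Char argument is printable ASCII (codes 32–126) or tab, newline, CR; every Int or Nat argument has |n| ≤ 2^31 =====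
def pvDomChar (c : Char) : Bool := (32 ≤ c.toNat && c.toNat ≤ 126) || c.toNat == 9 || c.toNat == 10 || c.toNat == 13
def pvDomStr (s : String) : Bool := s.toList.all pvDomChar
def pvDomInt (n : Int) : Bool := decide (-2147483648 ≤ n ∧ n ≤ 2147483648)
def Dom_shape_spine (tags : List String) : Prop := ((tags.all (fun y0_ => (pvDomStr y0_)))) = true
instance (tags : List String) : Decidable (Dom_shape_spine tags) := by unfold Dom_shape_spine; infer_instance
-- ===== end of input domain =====

-- B fuses classification and run-length compression into one pass (no intermediate spine list); same O(n), objective: simpler.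


-- ===== PORT A =====
-- loop of compress_tags over tags[1:], state (out, current, count)
def compressLoop (rest : List String) (out : List String) (current : String) (count : Int)
    (exact_counts : Bool) : List String :=
  match rest with
  | [] =>
      if count > 1 then
        out ++ [if exact_counts then current ++ "x" ++ PySem.Int.toStr count else current ++ "+"]
      else out ++ [current]
  | tag :: ts =>
      if tag == current then compressLoop ts out current (count + 1) exact_counts
      else
        compressLoop ts
          (out ++ [if count > 1 then
                     (if exact_counts then current ++ "x" ++ PySem.Int.toStr count else current ++ "+")
                   else current])
          tag 1 exact_counts

def compress_tags (tags : List String) (exact_counts : Bool) : List String :=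
  match tags with
  | [] => []
  | t0 :: rest => compressLoop rest [] t0 1 exact_counts

def shape_spine (tags : List String) : String :=
  let spine :=
    tags.foldl (fun spine tag =>
      if PySem.Str.startswith tag "OP_" then spine ++ [tag]
      else if tag == "PRON" || tag == "DET" || tag == "PREP" || tag == "AUX" then spine ++ [tag]
      else if tag == "COMMA" || tag == "COLON" || tag == "SEMI" then spine ++ ["BREAK"]
      else if tag == "PERIOD" || tag == "QMARK" || tag == "EMARK" then spine ++ ["END"]
      else spine) []
  if spine.isEmpty then "LEXICAL_ONLY"
  else PySem.Str.join " " (compress_tags spine false)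

-- ===== PORT B =====
-- set membership ported as equality with each of the (literal) set's elements (exact for frozensets of string literals)
def spineSymbol (tag : String) : Option String :=
  if PySem.Str.startswith tag "OP_" then some tag
  else if tag == "PRON" || tag == "DET" || tag == "PREP" || tag == "AUX" then some tag
  else if tag == "COMMA" || tag == "COLON" || tag == "SEMI" then some "BREAK"
  else if tag == "PERIOD" || tag == "QMARK" || tag == "EMARK" then some "END"
  else none

-- single pass: classify and run-length-compress at once; current = none until first symbol
def altLoop (tags : List String) (parts : List String) (current : Option String) (count : Int) : String :=
  match tags with
  | [] =>
      match current with
      | none => "LEXICAL_ONLY"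
      | some c => PySem.Str.join " " (parts ++ [if count > 1 then c ++ "+" else c])
  | tag :: ts =>
      match spineSymbol tag with
      | none => altLoop ts parts current count
      | some s =>
          if some s == current then altLoop ts parts current (count + 1)
          else
            match current with
            | none => altLoop ts parts (some s) 1
            | some c => altLoop ts (parts ++ [if count > 1 then c ++ "+" else c]) (some s) 1

def shape_spine_alt (tags : List String) : String :=
  altLoop tags [] none 0

-- ===== PRECONDITION & SPEC =====
def Spec_shape_spine (tags : List String) (out : String) : Prop := out = shape_spine_alt tags
instance (tags : List String) (out : String) : Decidable (Spec_shape_spine tags out) := by unfold Spec_shape_spine; infer_instance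

-- ===== CLAIM (what is proved, stated in full; the proofs are below) =====
def Claim_equal_shape_spine : Prop := ∀ (tags : List String), Dom_shape_spine tags → Spec_shape_spine tags (shape_spine tags)

-- ===== LEMMAS AND PROOFS =====

-- one step of A's spine loop appends exactly the classified symbol
theorem stepA_eq (spine : List String) (tag : String) :
    (if PySem.Str.startswith tag "OP_" then spine ++ [tag]
     else if tag == "PRON" || tag == "DET" || tag == "PREP" || tag == "AUX" then spine ++ [tag]
     else if tag == "COMMA" || tag == "COLON" || tag == "SEMI" then spine ++ ["BREAK"]
     else if tag == "PERIOD" || tag == "QMARK" || tag == "EMARK" then spine ++ ["END"]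
     else spine) = spine ++ (spineSymbol tag).toList := by
  simp only [spineSymbol]
  split_ifs <;> simp

-- A's accumulation loop builds acc ++ filterMap spineSymbol
theorem spine_foldl_eq (tags : List String) (acc : List String) :
    tags.foldl (fun spine tag =>
      if PySem.Str.startswith tag "OP_" then spine ++ [tag]
      else if tag == "PRON" || tag == "DET" || tag == "PREP" || tag == "AUX" then spine ++ [tag]
      else if tag == "COMMA" || tag == "COLON" || tag == "SEMI" then spine ++ ["BREAK"]
      else if tag == "PERIOD" || tag == "QMARK" || tag == "EMARK" then spine ++ ["END"]
      else spine) acc = acc ++ tags.filterMap spineSymbol := by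
  induction tags generalizing acc with
  | nil => simp
  | cons t ts ih =>
      rw [List.foldl_cons]
      show List.foldl _ (if PySem.Str.startswith t "OP_" then acc ++ [t]
        else if t == "PRON" || t == "DET" || t == "PREP" || t == "AUX" then acc ++ [t]
        else if t == "COMMA" || t == "COLON" || t == "SEMI" then acc ++ ["BREAK"]
        else if t == "PERIOD" || t == "QMARK" || t == "EMARK" then acc ++ ["END"]
        else acc) ts = _
      rw [stepA_eq, ih, List.filterMap_cons]
      cases spineSymbol t <;> simp

-- B's fused loop, once a run has started, is A's compress loop on the classified tail
theorem altLoop_some (tags : List String) (parts : List String) (c : String) (count : Int) :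
    altLoop tags parts (some c) count =
      PySem.Str.join " " (compressLoop (tags.filterMap spineSymbol) parts c count false) := by
  induction tags generalizing parts c count with
  | nil =>
      simp only [altLoop, List.filterMap_nil, compressLoop]
      split_ifs <;> simp_all
  | cons t ts ih =>
      simp only [List.filterMap_cons, altLoop]
      cases h : spineSymbol t with
      | none => simp [ih]
      | some s =>
          by_cases hs : s == c
          · have hsc : s = c := by simpa using hs
            simp [compressLoop, hsc, ih]
          · simp [compressLoop, hs, ih]

-- starting state: none ↦ case split on the first classified symbol
theorem altLoop_none (tags : List String) :
    altLoop tags [] none 0 =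
      match tags.filterMap spineSymbol with
      | [] => "LEXICAL_ONLY"
      | s :: rest => PySem.Str.join " " (compressLoop rest [] s 1 false) := by
  induction tags with
  | nil => simp [altLoop]
  | cons t ts ih =>
      simp only [List.filterMap_cons, altLoop]
      cases h : spineSymbol t with
      | none => simpa using ih
      | some s => simp [altLoop_some]

-- ===== VERDICT (by name: the statement is the Claim_ definition above) =====
theorem shape_spine_spec : Claim_equal_shape_spine := by
  intro tags _
  unfold Spec_shape_spine shape_spine shape_spine_alt
  rw [spine_foldl_eq, altLoop_none]
  cases h : tags.filterMap spineSymbol with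
  | nil => simp
  | cons s rest => simp [compress_tags]
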